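/- GENERATED by farm/mkstatement.py from design/units.tsv (unit `DGifGetImageDesc.4`) and the assertions of Gif/Spec/Seg_DGifGetImageDesc.lean — do not edit.
   THE STATEMENT of the proof unit `DGifGetImageDesc.4`: segment 4 of `DGifGetImageDesc` (11 instructions; entries 0x109503;
   exits 0x109535; ranges 0x109503-0x109535)
   takes each of its entry assertions to one of its exit assertions (`Gif.Spec.DGifGetImageDesc.Seg4`), given the contracts of its callees.
   What the names mean: ProgX/Base/Spec/Basic.lean (the shared hypotheses), Gif/Spec/Seg_DGifGetImageDesc.lean (the assertions). The theorem to prove: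
   `theorem DGifGetImageDesc_4_ok : Gif.Spec.DGifGetImageDesc_4.Statement`. -/
import Gif.Code
import Gif.Dec.All
import Gif.Labels
import Gif.Spec.Seg_DGifGetImageDesc
import ProgX.Base.Spec.Libc
namespace Gif.Spec.DGifGetImageDesc_4
open X86 X86.User Asan

/-- The statement of unit `DGifGetImageDesc.4`. -/
def Statement : Prop :=
  ∀ (Lay : Layout) (_hLay : Lay.hi = 0x1000000) (μ : Microarch) (_hμ : UserX.MicroOK μ) (u₀ : State)
    (_hcode : HasCodeNat Lay u₀ Gif.L.DGifGetImageDesc.entry Gif.Code.code_DGifGetImageDesc.nat Gif.L.DGifGetImageDesc.size)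
    (_h_memcpy : ∀ (others : List Obj) (frames : List (Nat × FrameLayout)), Calls Lay μ ProgX.Base.WayInv (ProgX.Base.conv u₀) ProgX.Base.L.memcpy.entry (ProgX.Base.Spec.memcpy.spec others frames))
    (_h_asan_load4_noabort : Asan.SmallCheck Lay μ ProgX.Base.WayInv (ProgX.Base.CodeOK u₀) [.rax, .rcx, .rdx] 4 ProgX.Base.L.__asan_load4_noabort.entry),
    Gif.Spec.DGifGetImageDesc.Seg4 Lay μ u₀

end Gif.Spec.DGifGetImageDesc_4
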